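-- pv_equiv track=rewrite | github.com/doakey3/Subsimport | operators/textparser/tools/find_even_split.py | find_even_split
-- ===== SOURCE A (Python) =====
-- def make_lines(line, space):
--     """
--     Make a list of lines that are less than or equal to space long
--     """
--     word_list = line.split(' ')
--     lines = []
--     growing_string = ''
--     while len(word_list) > 0:
--         if len((growing_string + ' ' + word_list[0]).strip()) <= space:
--             growing_string += ' ' + word_list[0]
--             growing_string = growing_string.strip()
--         else:
--             lines.append(growing_string.strip())
--             growing_string = word_list[0]
--         word_list.pop(0)
--     lines.append(growing_string)
--     return lines
--
-- def find_even_split(line):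
--     max_line_length = 31
--     output = make_lines(line, max_line_length)
--     max_lines = len(output)
--     space = max_line_length - 1
--     while len(make_lines(line, space)) == max_lines:
--         space -= 1
--     lines = make_lines(line, space + 1)
--     return '\n'.join(make_lines(line, space + 1))
-- ===== SOURCE B (Python) =====
-- def make_lines(line, space):
--     """
--     Make a list of lines that are less than or equal to space long
--     """
--     word_list = line.split(' ')
--     lines = []
--     growing_string = ''
--     while len(word_list) > 0:
--         if len((growing_string + ' ' + word_list[0]).strip()) <= space:
--             growing_string += ' ' + word_list[0]
--             growing_string = growing_string.strip()
--         else: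
--             lines.append(growing_string.strip())
--             growing_string = word_list[0]
--         word_list.pop(0)
--     lines.append(growing_string)
--     return lines
--
--
-- def find_even_split(line):
--     target = len(make_lines(line, 31))
--     # The most even layout uses the smallest width that still yields the same
--     # number of lines: one more than the widest width that breaks the layout.
--     # If even width 0 keeps the line count, width 0 is already the answer.
--     narrower = [w for w in range(31) if len(make_lines(line, w)) != target]
--     width = max(narrower) + 1 if narrower else 0
--     return '\n'.join(make_lines(line, width))
-- ===== Notes on version B (the rewrite author's own statement) =====
-- stated objective: alternative
-- what changed: Replaces A's early-exit downward while-loop (decrement width until the line count changes) by a total filter of the widths 0..30 whose line count differs from the count at width 31 and taking max()+1 of that list (width 0 when the list is empty); Pre_ excludes only the inputs on which A's while-loop never terminates (every word alone already overflows width 31, so the line count never changes) - A returns nothing there while B returns a value.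
import Mathlib
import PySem

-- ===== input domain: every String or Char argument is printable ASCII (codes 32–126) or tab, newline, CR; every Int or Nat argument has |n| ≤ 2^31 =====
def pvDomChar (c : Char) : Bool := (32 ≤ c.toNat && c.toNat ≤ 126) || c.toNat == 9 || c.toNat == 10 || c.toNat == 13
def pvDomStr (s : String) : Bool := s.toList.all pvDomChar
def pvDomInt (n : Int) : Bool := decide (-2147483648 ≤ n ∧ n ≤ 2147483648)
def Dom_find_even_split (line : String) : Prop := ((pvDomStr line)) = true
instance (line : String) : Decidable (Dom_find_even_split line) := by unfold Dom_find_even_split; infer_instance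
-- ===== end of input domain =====

-- B replaces A's early-exit downward width scan by a total filter of the widths
-- 0..30 whose line count differs from width 31's, followed by max()+1 (0 if none).

-- ===== PORT A =====

-- while len(word_list) > 0: … (structural recursion on the word list; state = (lines, growing_string))
def mkLoop (space : Int) : List String → List String → String → List String
  | [], lines, g => lines ++ [g]
  | w :: ws, lines, g =>
    if PySem.Str.len (PySem.Str.strip (g ++ " " ++ w)) ≤ space then
      mkLoop space ws lines (PySem.Str.strip (g ++ " " ++ w))
    else
      mkLoop space ws (lines ++ [PySem.Str.strip g]) w

-- line.split(' '): split? with the non-empty separator " " always returns some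
def make_lines (line : String) (space : Int) : List String :=
  mkLoop space ((PySem.Str.split? line " ").getD []) [] ""

-- while len(make_lines(line, space)) == max_lines: space -= 1
-- fueled: on every input where the Python loop terminates it stops at space ≥ -1,
-- so fuel 32 (widths 30 down to -1) is never exhausted inside Pre_.
def scanA (line : String) (target : Int) : Nat → Int → Int
  | 0, s => s
  | k + 1, s =>
    if PySem.List.len (make_lines line s) = target then scanA line target k (s - 1) else s

def find_even_split (line : String) : String :=
  let maxLines := PySem.List.len (make_lines line 31)
  let space := scanA line maxLines 32 30
  PySem.Str.join "\n" (make_lines line (space + 1))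

-- ===== PORT B =====

def find_even_split_alt (line : String) : String :=
  let target := PySem.List.len (make_lines line 31)
  let narrower := (PySem.List.pyRange 0 31 1).filter
      (fun w => PySem.List.len (make_lines line w) != target)
  let width := match PySem.List.max? narrower (fun x => x) with
    | some m => m + 1
    | none => 0
  PySem.Str.join "\n" (make_lines line width)

-- ===== PRECONDITION & SPEC =====

-- Pre_ excludes exactly the inputs on which A's while-loop never terminates
-- (A returns no value there): those where the first word, and every adjacent
-- pair of words, strip to more than 31 characters, so every width produces
-- the same word-per-line count.
def Pre_find_even_split (line : String) : Prop :=
  ¬ ((∀ w0 ∈ ((PySem.Str.split? line " ").getD []).head?,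
        31 < PySem.Str.len (PySem.Str.strip (" " ++ w0))) ∧
     ∀ p ∈ ((PySem.Str.split? line " ").getD []).zip ((PySem.Str.split? line " ").getD []).tail,
        31 < PySem.Str.len (PySem.Str.strip (p.1 ++ " " ++ p.2)))
instance (line : String) : Decidable (Pre_find_even_split line) := by
  unfold Pre_find_even_split; infer_instance

def pvWitness_find_even_split : String := "hello even split world"

def Spec_find_even_split (line : String) (out : String) : Prop := out = find_even_split_alt line
instance (line : String) (out : String) : Decidable (Spec_find_even_split line out) := by unfold Spec_find_even_split; infer_instance

-- ===== CLAIM (what is proved, stated in full; the proofs are below) =====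
def Claim_equal_find_even_split : Prop := ∀ (line : String), Dom_find_even_split line → Pre_find_even_split line → Spec_find_even_split line (find_even_split line)

-- ===== LEMMAS AND PROOFS =====

theorem strLen_nonneg (s : String) : 0 ≤ PySem.Str.len s := by
  rw [PySem.Str.len_eq]; positivity

-- the chain of failed fit-checks along the all-else path of make_lines
def chainP (s : Int) : String → List String → Prop
  | _, [] => True
  | g, w :: ws => s < PySem.Str.len (PySem.Str.strip (g ++ " " ++ w)) ∧ chainP s w ws

theorem mkLoop_len_le (space : Int) (ws : List String) (lines : List String) (g : String) :
    (mkLoop space ws lines g).length ≤ lines.length + ws.length + 1 := by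
  induction ws generalizing lines g with
  | nil => simp [mkLoop]
  | cons w ws ih =>
    simp only [mkLoop, List.length_cons]
    split
    · have := ih lines (PySem.Str.strip (g ++ " " ++ w)); omega
    · have := ih (lines ++ [PySem.Str.strip g]) w
      simp only [List.length_append, List.length_cons, List.length_nil] at this; omega

theorem mkLoop_len_neg (space : Int) (h : space < 0) (ws : List String)
    (lines : List String) (g : String) :
    (mkLoop space ws lines g).length = lines.length + ws.length + 1 := by
  induction ws generalizing lines g with
  | nil => simp [mkLoop]
  | cons w ws ih =>
    have hnn := strLen_nonneg (PySem.Str.strip (g ++ " " ++ w))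
    simp only [mkLoop, List.length_cons, if_neg (show ¬ PySem.Str.len (PySem.Str.strip (g ++ " " ++ w)) ≤ space by omega)]
    have := ih (lines ++ [PySem.Str.strip g]) w
    simp only [List.length_append, List.length_cons, List.length_nil] at this; omega

theorem mkLoop_len_eq_iff_chain (space : Int) (ws : List String)
    (lines : List String) (g : String) :
    (mkLoop space ws lines g).length = lines.length + ws.length + 1 ↔ chainP space g ws := by
  induction ws generalizing lines g with
  | nil => simp [mkLoop, chainP]
  | cons w ws ih =>
    simp only [mkLoop, chainP, List.length_cons]
    split
    · rename_i hc
      have hle := mkLoop_len_le space ws lines (PySem.Str.strip (g ++ " " ++ w))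
      constructor
      · intro h; omega
      · rintro ⟨h1, -⟩; omega
    · rename_i hc
      have hiff := ih (lines ++ [PySem.Str.strip g]) w
      simp only [List.length_append, List.length_cons, List.length_nil] at hiff
      constructor
      · intro h
        exact ⟨by omega, hiff.mp (by omega)⟩
      · rintro ⟨-, h2⟩
        have := hiff.mpr h2; omega

theorem chainP_iff (s : Int) (ws : List String) (g : String) :
    chainP s g ws ↔
      ((∀ w0 ∈ ws.head?, s < PySem.Str.len (PySem.Str.strip (g ++ " " ++ w0))) ∧
       ∀ p ∈ ws.zip ws.tail, s < PySem.Str.len (PySem.Str.strip (p.1 ++ " " ++ p.2))) := by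
  induction ws generalizing g with
  | nil => simp [chainP]
  | cons w ws ih =>
    cases ws with
    | nil => simp [chainP]
    | cons w' ws' =>
      have h' := ih w
      simp only [chainP] at h' ⊢
      simp only [List.head?_cons, List.tail_cons, List.zip_cons_cons, List.mem_cons,
        Option.mem_def, Option.some.injEq] at h' ⊢
      constructor
      · rintro ⟨h1, h2⟩
        have h3 := h'.mp h2
        refine ⟨fun w0 hw0 => by subst hw0; exact h1, ?_⟩
        rintro p (rfl | hp)
        · exact h3.1 w' rfl
        · exact h3.2 p hp
      · rintro ⟨h1, h2⟩
        refine ⟨h1 w rfl, h'.mpr ⟨fun w0 hw0 => by subst hw0; exact h2 (w, w') (Or.inl rfl), ?_⟩⟩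
        intro p hp; exact h2 p (Or.inr hp)

-- under Pre_, some fit-check at width 31 succeeds, so that split has at most one line per word
theorem count31_le (line : String) (hp : Pre_find_even_split line) :
    (make_lines line 31).length ≤ ((PySem.Str.split? line " ").getD []).length := by
  have hle := mkLoop_len_le 31 ((PySem.Str.split? line " ").getD []) [] ""
  simp only [List.length_nil, Nat.zero_add] at hle
  have hne : (make_lines line 31).length ≠ ((PySem.Str.split? line " ").getD []).length + 1 := by
    intro h
    apply hp
    have hch : chainP 31 "" ((PySem.Str.split? line " ").getD []) := by
      have hiff := mkLoop_len_eq_iff_chain 31 ((PySem.Str.split? line " ").getD []) [] ""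
      simp only [List.length_nil, Nat.zero_add] at hiff
      exact hiff.mp (by simpa [make_lines] using h)
    have hz := (chainP_iff 31 ((PySem.Str.split? line " ").getD []) "").mp hch
    refine ⟨?_, hz.2⟩
    intro w0 hw0
    have := hz.1 w0 hw0
    simpa using this
  simp only [make_lines] at hne ⊢
  omega

theorem count_neg (line : String) (s : Int) (h : s < 0) :
    (make_lines line s).length = ((PySem.Str.split? line " ").getD []).length + 1 := by
  simpa [make_lines] using mkLoop_len_neg s h ((PySem.Str.split? line " ").getD []) [] ""

-- the downward scan stops at the greatest width ≤ its start whose count differs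
theorem scanA_spec (line : String) (target : Int)
    (hneg : PySem.List.len (make_lines line (-1)) ≠ target) :
    ∀ (k : Nat) (s : Int), -1 ≤ s → s + 2 ≤ (k : Int) →
      (-1 ≤ scanA line target k s ∧ scanA line target k s ≤ s ∧
       PySem.List.len (make_lines line (scanA line target k s)) ≠ target ∧
       ∀ v : Int, scanA line target k s < v → v ≤ s →
         PySem.List.len (make_lines line v) = target) := by
  intro k
  induction k with
  | zero => intro s hs hk; exfalso; simp at hk; omega
  | succ k ih =>
    intro s hs hk
    by_cases hc : PySem.List.len (make_lines line s) = target
    · have hs0 : s ≠ -1 := by intro h; rw [h] at hc; exact hneg hc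
      obtain ⟨ih1, ih2, ih3, ih4⟩ := ih (s - 1) (by omega) (by push_cast at hk ⊢; omega)
      simp only [scanA, if_pos hc]
      refine ⟨ih1, by omega, ih3, ?_⟩
      intro v h1 h2
      by_cases hv : v = s
      · rwa [hv]
      · exact ih4 v h1 (by omega)
    · simp only [scanA, if_neg hc]
      exact ⟨hs, le_refl s, hc, by intro v h1 h2; omega⟩

-- ===== VERDICT (by name: the statement is the Claim_ definition above) =====
theorem find_even_split_spec : Claim_equal_find_even_split := by
  intro line _ hp
  unfold Spec_find_even_split
  set target := PySem.List.len (make_lines line 31) with htarget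
  have hneg : PySem.List.len (make_lines line (-1)) ≠ target := by
    have h1 := count_neg line (-1) (by omega)
    have h2 := count31_le line hp
    rw [htarget, PySem.List.len_eq, PySem.List.len_eq, h1]
    intro h
    have : ((PySem.Str.split? line " ").getD []).length + 1 = (make_lines line 31).length := by
      exact_mod_cast h
    omega
  obtain ⟨h1, h2, h3, h4⟩ := scanA_spec line target hneg 32 30 (by omega) (by norm_num)
  set r := scanA line target 32 30 with hr
  set narrower := (PySem.List.pyRange 0 31 1).filter
      (fun w => PySem.List.len (make_lines line w) != target) with hnar
  have hA : find_even_split line =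
      PySem.Str.join "\n" (make_lines line
        (scanA line (PySem.List.len (make_lines line 31)) 32 30 + 1)) := rfl
  have hB : find_even_split_alt line =
      PySem.Str.join "\n" (make_lines line
        (match PySem.List.max? ((PySem.List.pyRange 0 31 1).filter
            (fun w => PySem.List.len (make_lines line w) != PySem.List.len (make_lines line 31)))
            (fun x => x) with
          | some m => m + 1
          | none => 0)) := rfl
  rw [hA, hB, ← htarget, ← hr, ← hnar]
  by_cases hr0 : 0 ≤ r
  · have hrmem : r ∈ narrower := by
      rw [hnar]
      refine List.mem_filter.mpr ⟨?_, ?_⟩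
      · exact (PySem.List.mem_pyRange_one).mpr ⟨hr0, by omega⟩
      · simpa using h3
    have hmax : ∀ y ∈ narrower, y ≤ r := by
      intro y hy
      rw [hnar] at hy
      obtain ⟨hy1, hy2⟩ := List.mem_filter.mp hy
      have hy34 := (PySem.List.mem_pyRange_one).mp hy1
      by_contra hgt
      have := h4 y (by omega) (by omega)
      rw [PySem.List.len_eq] at this
      simp [this] at hy2
    obtain ⟨m, hm⟩ : ∃ m, PySem.List.max? narrower (fun x => x) = some m := by
      cases hmq : PySem.List.max? narrower (fun x => x) with
      | none =>
        exfalso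
        have : narrower = [] := (PySem.List.max?_eq_none_iff narrower _).mp hmq
        rw [this] at hrmem; simp at hrmem
      | some m => exact ⟨m, rfl⟩
    have hmr : m = r := by
      have hle1 : m ≤ r := hmax m (PySem.List.max?_mem hm)
      have hle2 : r ≤ m := PySem.List.max?_isMax hm r hrmem
      omega
    rw [hm, hmr]
  · have hrneg : r = -1 := by omega
    have hnil : narrower = [] := by
      rw [hnar]
      refine List.filter_eq_nil_iff.mpr ?_
      intro y hy
      have hy34 := (PySem.List.mem_pyRange_one).mp hy
      have := h4 y (by omega) (by omega)
      rw [PySem.List.len_eq] at this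
      simp [this]
    have : PySem.List.max? narrower (fun x => x) = none := by
      rw [hnil]
      exact (PySem.List.max?_eq_none_iff [] _).mpr rfl
    rw [this, hrneg]
    norm_num
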